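-- pv_equiv track=rewrite | github.com/IT-coach-666/leetcode-public | leetcode_jy/jy_0001_0500/jy_0201_0250/jy_0205.py | isIsomorphic_jy_false
-- ===== SOURCE A (Python) =====
-- def isIsomorphic_jy_false(s: str, t: str) -> bool:
--     s2t = {}
--     for char_s, char_t in zip(s, t):
--         if char_s not in s2t:
--             s2t[char_s] = char_t
--         elif s2t[char_s] != char_t:
--             return False
--     return True
-- ===== SOURCE B (Python) =====
-- def isIsomorphic_jy_false(s: str, t: str) -> bool:
--     pairs = set(zip(s, t))
--     return len(pairs) == len({c for c, _ in pairs})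
-- ===== Notes on version B (the rewrite author's own statement) =====
-- stated objective: idiomatic
-- what changed: Replaces the incremental dict-with-early-exit scan by a set-counting criterion: the mapping s->t is consistent iff the number of distinct (s_char, t_char) pairs equals the number of distinct source chars.
import Mathlib
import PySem

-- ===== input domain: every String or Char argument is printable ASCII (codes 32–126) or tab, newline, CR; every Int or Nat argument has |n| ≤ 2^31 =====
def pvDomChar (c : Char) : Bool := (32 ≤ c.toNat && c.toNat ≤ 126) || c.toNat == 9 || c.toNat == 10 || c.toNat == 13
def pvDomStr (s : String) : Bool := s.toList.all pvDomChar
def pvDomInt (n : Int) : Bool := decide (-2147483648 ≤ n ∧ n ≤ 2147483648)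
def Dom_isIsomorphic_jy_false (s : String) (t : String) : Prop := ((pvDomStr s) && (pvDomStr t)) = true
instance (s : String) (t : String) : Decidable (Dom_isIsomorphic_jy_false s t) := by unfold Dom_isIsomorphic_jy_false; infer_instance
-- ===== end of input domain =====

-- B replaces A's incremental dict-with-early-exit scan by a set-counting criterion
-- (distinct pairs vs distinct source chars); objective: idiomatic, same cost.

-- ===== PORT A =====
-- the 'for char_s, char_t in zip(s, t)' loop with the dict s2t and the early 'return False'
def pvALoop : List (Char × Char) → PySem.Dict Char Char → Bool
  | [], _ => true
  | (cs, ct) :: rest, d =>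
    if d.contains cs = false then pvALoop rest (d.insert cs ct)
    else if d.get? cs ≠ some ct then false
    else pvALoop rest d

def isIsomorphic_jy_false (s : String) (t : String) : Bool :=
  pvALoop (List.zip s.toList t.toList) PySem.Dict.empty

-- ===== PORT B =====
def isIsomorphic_jy_false_alt (s : String) (t : String) : Bool :=
  let pairs : PySem.Set (Char × Char) := PySem.Set.ofList (List.zip s.toList t.toList)
  PySem.Set.len pairs == PySem.Set.len (PySem.Set.ofList (pairs.map Prod.fst))

-- ===== PRECONDITION & SPEC =====
def Spec_isIsomorphic_jy_false (s : String) (t : String) (out : Bool) : Prop := out = isIsomorphic_jy_false_alt s t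
instance (s : String) (t : String) (out : Bool) : Decidable (Spec_isIsomorphic_jy_false s t out) := by unfold Spec_isIsomorphic_jy_false; infer_instance

-- ===== CLAIM (what is proved, stated in full; the proofs are below) =====
def Claim_equal_isIsomorphic_jy_false : Prop := ∀ (s : String) (t : String), Dom_isIsomorphic_jy_false s t → Spec_isIsomorphic_jy_false s t (isIsomorphic_jy_false s t)

-- ===== LEMMAS AND PROOFS =====

-- the common characterisation: every two pairs of the list with equal first component agree
def pvFunc (m : List (Char × Char)) : Prop :=
  ∀ p ∈ m, ∀ q ∈ m, p.1 = q.1 → p.2 = q.2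

theorem pvFunc_of_map_fst_nodup {m : List (Char × Char)} (h : (m.map Prod.fst).Nodup) :
    pvFunc m := by
  intro p hp q hq hfst
  have := List.inj_on_of_nodup_map h hp hq hfst
  rw [this]

-- A's loop, characterised: with unique keys in the dict, it returns true iff items ++ l is functional
theorem pvALoop_iff (l : List (Char × Char)) (d : PySem.Dict Char Char)
    (hnd : d.keys.Nodup) : pvALoop l d = true ↔ pvFunc (d.items ++ l) := by
  induction l generalizing d with
  | nil =>
    simp only [pvALoop, List.append_nil, true_iff]
    exact pvFunc_of_map_fst_nodup hnd
  | cons hd rest ih =>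
    obtain ⟨a, b⟩ := hd
    by_cases hc : d.contains a = false
    · rw [pvALoop, if_pos hc, ih _ (PySem.Dict.nodup_keys_insert d a b hnd),
        PySem.Dict.items_insert_of_not_contains d b hc, List.append_assoc]
      rfl
    · have hc : d.contains a = true := by revert hc; cases d.contains a <;> simp
      rcases hg : d.get? a with _ | c
      · rw [PySem.Dict.get?_eq_none_iff_contains] at hg
        rw [hg] at hc; cases hc
      · have hmem : (a, c) ∈ d.items := PySem.Dict.mem_items_of_get?_eq_some d hg
        by_cases hcb : c = b
        · subst hcb
          rw [pvALoop, if_neg (by simp [hc]), if_neg (by simp [hg]), ih d hnd]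
          constructor
          · intro h p hp q hq hfst
            have red : ∀ r, r ∈ d.items ++ (a, c) :: rest → r ∈ d.items ++ rest := by
              intro r hr
              rcases List.mem_append.1 hr with h1 | h1
              · exact List.mem_append.2 (Or.inl h1)
              · rcases List.mem_cons.1 h1 with h2 | h2
                · subst h2; exact List.mem_append.2 (Or.inl hmem)
                · exact List.mem_append.2 (Or.inr h2)
            exact h p (red p hp) q (red q hq) hfst
          · intro h p hp q hq hfst
            have ext : ∀ r, r ∈ d.items ++ rest → r ∈ d.items ++ (a, c) :: rest := by
              intro r hr
              rcases List.mem_append.1 hr with h1 | h1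
              · exact List.mem_append.2 (Or.inl h1)
              · exact List.mem_append.2 (Or.inr (List.mem_cons_of_mem _ h1))
            exact h p (ext p hp) q (ext q hq) hfst
        · rw [pvALoop, if_neg (by simp [hc]), if_pos (by simp [hg, hcb])]
          simp only [Bool.false_eq_true, false_iff]
          intro h
          exact hcb (h (a, c) (List.mem_append.2 (Or.inl hmem)) (a, b)
            (List.mem_append.2 (Or.inr (List.mem_cons_self))) rfl)

-- Set.ofList keeps a sublist of the input
theorem pvFoldlAdd_sublist {α : Type} [BEq α] (l acc : List α) :
    (l.foldl PySem.Set.add acc).Sublist (acc ++ l) := by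
  induction l generalizing acc with
  | nil => simp
  | cons x xs ih =>
    simp only [List.foldl_cons]
    refine (ih (PySem.Set.add acc x)).trans ?_
    have hadd : (PySem.Set.add acc x).Sublist (acc ++ [x]) := by
      unfold PySem.Set.add
      split
      · exact List.sublist_append_left acc [x]
      · exact List.Sublist.refl _
    have h2 := hadd.append_right xs
    rw [List.append_assoc] at h2
    exact h2

theorem pvOfList_sublist {α : Type} [BEq α] (l : List α) :
    (PySem.Set.ofList l).Sublist l := by
  have := pvFoldlAdd_sublist l []
  rwa [PySem.Set.ofList_eq_foldl]

-- the counting criterion of B ⇔ the firsts of the distinct pairs are distinct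
theorem pvB_iff (l : List (Char × Char)) :
    (PySem.Set.len (PySem.Set.ofList l) ==
      PySem.Set.len (PySem.Set.ofList ((PySem.Set.ofList l).map Prod.fst))) = true ↔ pvFunc l := by
  rw [PySem.Set.len_eq, PySem.Set.len_eq, beq_iff_eq, Nat.cast_inj]
  set u := PySem.Set.ofList l with hu
  constructor
  · intro hlen p hp q hq hfst
    have hlen' : (PySem.Set.ofList (u.map Prod.fst)).length = (u.map Prod.fst).length := by
      rw [← hlen]; simp
    have heq : PySem.Set.ofList (u.map Prod.fst) = u.map Prod.fst :=
      (pvOfList_sublist (u.map Prod.fst)).eq_of_length hlen'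
    have hnod : (u.map Prod.fst).Nodup := heq ▸ PySem.Set.nodup_ofList _
    have hp' : p ∈ u := (PySem.Set.mem_ofList l p).2 hp
    have hq' : q ∈ u := (PySem.Set.mem_ofList l q).2 hq
    have := List.inj_on_of_nodup_map hnod hp' hq' hfst
    rw [this]
  · intro hf
    have hnod : (u.map Prod.fst).Nodup := by
      refine List.Nodup.map_on ?_ (PySem.Set.nodup_ofList l)
      intro p hp q hq hfst
      have hp' : p ∈ l := (PySem.Set.mem_ofList l p).1 hp
      have hq' : q ∈ l := (PySem.Set.mem_ofList l q).1 hq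
      exact Prod.ext hfst (hf p hp' q hq' hfst)
    rw [PySem.Set.ofList_eq_self_of_nodup _ hnod]
    simp

-- ===== VERDICT (by name: the statement is the Claim_ definition above) =====
theorem isIsomorphic_jy_false_spec : Claim_equal_isIsomorphic_jy_false := by
  intro s t _
  unfold Spec_isIsomorphic_jy_false
  unfold isIsomorphic_jy_false isIsomorphic_jy_false_alt
  set l := List.zip s.toList t.toList with hl
  have hA := pvALoop_iff l PySem.Dict.empty (by simp [PySem.Dict.keys_empty])
  rw [show (PySem.Dict.empty : PySem.Dict Char Char).items = [] from rfl, List.nil_append] at hA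
  have hB := pvB_iff l
  show pvALoop l PySem.Dict.empty =
    (PySem.Set.len (PySem.Set.ofList l) ==
      PySem.Set.len (PySem.Set.ofList ((PySem.Set.ofList l).map Prod.fst)))
  rw [Bool.eq_iff_iff, hA]
  exact hB.symm
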